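-- pv_equiv track=rewrite | github.com/wmdubberley/euler_project | ep26.py | find_longest_recurring_cycle
-- ===== SOURCE A (Python) =====
-- def find_recurring_cycle_length(d):
--     # Remainders will be stored in a dictionary with their positions
--     remainders = {}
--     remainder = 1
--     position = 0
--
--     while remainder != 0:
--         # If the remainder repeats, we found the recurring cycle
--         if remainder in remainders:
--             return position - remainders[remainder]
--
--         # Store the position of the current remainder
--         remainders[remainder] = position
--
--         # Long division step: Multiply remainder by 10 and take mod d
--         remainder = (remainder * 10) % d
--         position += 1
--
--     # If remainder becomes zero, there's no recurring cycle
--     return 0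
--
-- def find_longest_recurring_cycle(limit):
--     max_length = 0
--     max_d = 0
--
--     for d in range(2, limit):
--         cycle_length = find_recurring_cycle_length(d)
--         if cycle_length > max_length:
--             max_length = cycle_length
--             max_d = d
--
--     return max_d, max_length
-- ===== SOURCE B (Python) =====
-- def _cycle_length(d):
--     # remove factors of 2 and 5: they only contribute to the non-repeating prefix
--     while d % 2 == 0:
--         d //= 2
--     while d % 5 == 0:
--         d //= 5
--     if d == 1:
--         return 0  # terminating decimal, no cycle
--     # multiplicative order of 10 modulo d
--     ten = 10 % d
--     length = 1
--     while ten != 1: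
--         ten = ten * 10 % d
--         length += 1
--     return length
--
-- def find_longest_recurring_cycle(limit):
--     best = (0, 0)
--     for d in range(2, limit):
--         length = _cycle_length(d)
--         if length > best[1]:
--             best = (d, length)
--     return best
-- ===== Notes on version B (the rewrite author's own statement) =====
-- stated objective: alternative
-- what changed: The helper no longer simulates long division with a remainder-to-position dictionary; it strips the factors two and five from the denominator and then measures the multiplicative order of ten modulo the reduced denominator with a bare modular loop (no dictionary, no pre-period steps).
import Mathlib
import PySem

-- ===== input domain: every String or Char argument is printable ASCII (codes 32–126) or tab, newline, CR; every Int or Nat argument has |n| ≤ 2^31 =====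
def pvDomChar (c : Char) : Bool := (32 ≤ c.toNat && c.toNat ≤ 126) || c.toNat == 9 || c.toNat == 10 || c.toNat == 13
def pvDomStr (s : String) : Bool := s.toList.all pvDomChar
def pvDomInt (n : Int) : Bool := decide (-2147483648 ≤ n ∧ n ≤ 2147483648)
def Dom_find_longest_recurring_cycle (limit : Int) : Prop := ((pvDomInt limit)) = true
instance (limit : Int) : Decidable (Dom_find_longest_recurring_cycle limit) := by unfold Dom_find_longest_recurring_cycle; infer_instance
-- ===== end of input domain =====

-- B replaces A's long-division dictionary simulation by stripping the factors two and five from the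
-- denominator and measuring the multiplicative order of ten modulo the reduced denominator.


-- ===== PORT A =====
-- while remainder != 0: … (fuel recursion; fuel 2*d+4 always suffices for the d ≥ 2 the caller passes)
def pvCycleA (d : Int) (remainders : Std.HashMap Int Int) (remainder position : Int) : Nat → Int
  | 0 => 0
  | fuel + 1 =>
    if remainder ≠ 0 then
      match remainders.get? remainder with
      | some p => position - p
      | none =>
          pvCycleA d (remainders.insert remainder position)
            (PySem.Int.mod (remainder * 10) d) (position + 1) fuel
    else 0

def find_recurring_cycle_length (d : Int) : Int :=
  pvCycleA d (∅ : Std.HashMap Int Int) 1 0 (2 * d.toNat + 4)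

def find_longest_recurring_cycle (limit : Int) : Int × Int :=
  let st := (PySem.List.pyRange 2 limit 1).foldl
    (fun (st : Int × Int) d =>
      let cycle_length := find_recurring_cycle_length d
      if cycle_length > st.1 then (cycle_length, d) else st) (0, 0)
  (st.2, st.1)

-- ===== PORT B =====
-- while d % p == 0: d //= p   (fuel recursion; fuel = d suffices for d ≥ 1)
def pvStrip (p d : Int) : Nat → Int
  | 0 => d
  | fuel + 1 =>
    if PySem.Int.mod d p = 0 then pvStrip p (PySem.Int.floordiv d p) fuel else d

-- while ten != 1: ten = ten * 10 % d; length += 1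
def pvOrderLoop (d ten length : Int) : Nat → Int
  | 0 => length
  | fuel + 1 =>
    if ten ≠ 1 then pvOrderLoop d (PySem.Int.mod (ten * 10) d) (length + 1) fuel else length

def pvCycleLengthAlt (d : Int) : Int :=
  let d1 := pvStrip 2 d d.toNat
  let d2 := pvStrip 5 d1 d.toNat
  if d2 = 1 then 0
  else pvOrderLoop d2 (PySem.Int.mod 10 d2) 1 d2.toNat

def find_longest_recurring_cycle_alt (limit : Int) : Int × Int :=
  (PySem.List.pyRange 2 limit 1).foldl
    (fun (best : Int × Int) d =>
      let length := pvCycleLengthAlt d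
      if length > best.2 then (d, length) else best) (0, 0)

-- ===== PRECONDITION & SPEC =====
def Spec_find_longest_recurring_cycle (limit : Int) (out : Int × Int) : Prop := out = find_longest_recurring_cycle_alt limit
instance (limit : Int) (out : Int × Int) : Decidable (Spec_find_longest_recurring_cycle limit out) := by unfold Spec_find_longest_recurring_cycle; infer_instance

-- ===== CLAIM (what is proved, stated in full; the proofs are below) =====
def Claim_equal_find_longest_recurring_cycle : Prop := ∀ (limit : Int), Dom_find_longest_recurring_cycle limit → Spec_find_longest_recurring_cycle limit (find_longest_recurring_cycle limit)

-- ===== LEMMAS AND PROOFS =====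

-- The remainder sequence of the long division of 1 by n.
def pvR (n k : Nat) : Nat := 10 ^ k % n

-- The dictionary A has built after k loop iterations.
def pvDictK (n k : Nat) : Std.HashMap Int Int :=
  (List.range k).foldl (fun d i => d.insert ((pvR n i : Nat) : Int) (i : Int)) (∅ : Std.HashMap Int Int)

-- Nat model of pvStrip.
def pvStripN (p x : Nat) : Nat → Nat
  | 0 => x
  | fuel + 1 => if x % p = 0 then pvStripN p (x / p) fuel else x

lemma pvDictK_succ (n k : Nat) :
    pvDictK n (k + 1) = (pvDictK n k).insert ((pvR n k : Nat) : Int) (k : Int) := by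
  simp [pvDictK, List.range_succ]

lemma pvDictK_get_none (n k : Nat) (x : Int)
    (h : ∀ i, i < k → ((pvR n i : Nat) : Int) ≠ x) :
    (pvDictK n k).get? x = none := by
  induction k with
  | zero => simp [pvDictK, List.range_zero, Std.HashMap.get?_eq_getElem?]
  | succ k ih =>
      rw [pvDictK_succ]
      rw [show (((pvDictK n k).insert ((pvR n k : Nat) : Int) (k : Int)).get? x
            = (pvDictK n k).get? x) by
        simp [Std.HashMap.get?_eq_getElem?, Std.HashMap.getElem?_insert,
          h k (Nat.lt_succ_self k)]]
      exact ih (fun i hi => h i (Nat.lt_succ_of_lt hi))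

lemma pvDictK_get_some (n k i0 : Nat) (x : Int) (hi0 : i0 < k)
    (hx : ((pvR n i0 : Nat) : Int) = x)
    (h : ∀ i, i0 < i → i < k → ((pvR n i : Nat) : Int) ≠ x) :
    (pvDictK n k).get? x = some (i0 : Int) := by
  induction k with
  | zero => omega
  | succ k ih =>
      rw [pvDictK_succ]
      rcases Nat.lt_or_ge i0 k with hk | hk
      · rw [show (((pvDictK n k).insert ((pvR n k : Nat) : Int) (k : Int)).get? x
              = (pvDictK n k).get? x) by
          simp [Std.HashMap.get?_eq_getElem?, Std.HashMap.getElem?_insert,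
            h k hk (Nat.lt_succ_self k)]]
        exact ih hk (fun i h1 h2 => h i h1 (Nat.lt_succ_of_lt h2))
      · have hik : i0 = k := by omega
        subst hik
        rw [← hx]
        simp [Std.HashMap.get?_eq_getElem?]

lemma pvR_succ (n k : Nat) :
    PySem.Int.mod (((pvR n k : Nat) : Int) * 10) (n : Int) = ((pvR n (k + 1) : Nat) : Int) := by
  have h : ((pvR n k : Nat) : Int) * 10 = ((pvR n k * 10 : Nat) : Int) := by push_cast; ring
  rw [h, PySem.Int.mod_natCast]
  congr 1
  simp [pvR, pow_succ, Nat.mul_mod]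

-- A's loop, run until the remainder repeats: returns the distance t of the repeat.
lemma pvLoopA_hit (n s t : Nat) (ht : 1 ≤ t)
    (hrep : pvR n (s + t) = pvR n s)
    (hfresh : ∀ k, k < s + t → ∀ i, i < k → pvR n i ≠ pvR n k)
    (hnz : ∀ k, k ≤ s + t → pvR n k ≠ 0) :
    ∀ fuel k, k ≤ s + t → s + t - k < fuel →
      pvCycleA (n : Int) (pvDictK n k) ((pvR n k : Nat) : Int) (k : Int) fuel = (t : Int) := by
  intro fuel
  induction fuel with
  | zero => omega
  | succ fuel ih =>
      intro k hk hfuel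
      rcases Nat.eq_or_lt_of_le hk with heq | hlt
      · subst heq
        have hz : ((pvR n (s + t) : Nat) : Int) ≠ 0 := by
          exact_mod_cast hnz (s + t) le_rfl
        have hget : (pvDictK n (s + t)).get? ((pvR n (s + t) : Nat) : Int) = some (s : Int) := by
          apply pvDictK_get_some n (s + t) s _ (by omega)
          · exact_mod_cast hrep.symm
          · intro i h1 h2 hcast
            have heq2 : pvR n i = pvR n (s + t) := by exact_mod_cast hcast
            exact (hfresh i h2 s h1 (by rw [heq2, hrep])).elim
        simp only [pvCycleA, if_pos hz, hget]
        push_cast; ring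
      · have hz : ((pvR n k : Nat) : Int) ≠ 0 := by
          exact_mod_cast hnz k (le_of_lt hlt)
        have hget : (pvDictK n k).get? ((pvR n k : Nat) : Int) = none := by
          apply pvDictK_get_none
          intro i hi hcast
          have heq2 : pvR n i = pvR n k := by exact_mod_cast hcast
          exact hfresh k hlt i hi heq2
        simp only [pvCycleA, if_pos hz, hget]
        rw [pvR_succ, ← pvDictK_succ]
        have hc : ((k : Int) + 1) = ((k + 1 : Nat) : Int) := by push_cast; ring
        rw [hc]
        exact ih (k + 1) (by omega) (by omega)

-- A's loop, run until the remainder becomes 0: returns 0.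
lemma pvLoopA_zero (n s : Nat)
    (hrs : pvR n s = 0)
    (hfresh : ∀ k, k < s → ∀ i, i < k → pvR n i ≠ pvR n k)
    (hnz : ∀ k, k < s → pvR n k ≠ 0) :
    ∀ fuel k, k ≤ s → s - k < fuel →
      pvCycleA (n : Int) (pvDictK n k) ((pvR n k : Nat) : Int) (k : Int) fuel = 0 := by
  intro fuel
  induction fuel with
  | zero => omega
  | succ fuel ih =>
      intro k hk hfuel
      rcases Nat.eq_or_lt_of_le hk with heq | hlt
      · subst heq
        simp [pvCycleA, hrs]
      · have hz : ((pvR n k : Nat) : Int) ≠ 0 := by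
          exact_mod_cast hnz k hlt
        have hget : (pvDictK n k).get? ((pvR n k : Nat) : Int) = none := by
          apply pvDictK_get_none
          intro i hi hcast
          have heq2 : pvR n i = pvR n k := by exact_mod_cast hcast
          exact hfresh k hlt i hi heq2
        simp only [pvCycleA, if_pos hz, hget]
        rw [pvR_succ, ← pvDictK_succ]
        have hc : ((k : Int) + 1) = ((k + 1 : Nat) : Int) := by push_cast; ring
        rw [hc]
        exact ih (k + 1) (by omega) (by omega)

-- B's order loop: starting at exponent l, stops at the order t.
lemma pvLoopB (m t : Nat)
    (ht2 : 10 ^ t % m = 1)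
    (htmin : ∀ l, 0 < l → l < t → 10 ^ l % m ≠ 1) :
    ∀ fuel l, 1 ≤ l → l ≤ t → t - l < fuel →
      pvOrderLoop (m : Int) ((10 ^ l % m : Nat) : Int) (l : Int) fuel = (t : Int) := by
  intro fuel
  induction fuel with
  | zero => omega
  | succ fuel ih =>
      intro l hl1 hlt hfuel
      rcases Nat.eq_or_lt_of_le hlt with heq | hlt'
      · subst heq
        simp [pvOrderLoop, ht2]
      · have hne : ((10 ^ l % m : Nat) : Int) ≠ 1 := by
          exact_mod_cast htmin l hl1 hlt'
        simp only [pvOrderLoop, if_pos hne]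
        have hstep : PySem.Int.mod (((10 ^ l % m : Nat) : Int) * 10) (m : Int)
            = ((10 ^ (l + 1) % m : Nat) : Int) := by
          have h : ((10 ^ l % m : Nat) : Int) * 10 = ((10 ^ l % m * 10 : Nat) : Int) := by
            push_cast; ring
          rw [h, PySem.Int.mod_natCast]
          congr 1
          simp [pow_succ, Nat.mul_mod]
        rw [hstep]
        have hc : ((l : Int) + 1) = ((l + 1 : Nat) : Int) := by push_cast; ring
        rw [hc]
        exact ih (l + 1) (by omega) (by omega) (by omega)

-- pvStrip on nonnegative inputs is the Nat model.
lemma pvStrip_natCast (p x : Nat) :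
    ∀ fuel, pvStrip (p : Int) (x : Int) fuel = ((pvStripN p x fuel : Nat) : Int) := by
  intro fuel
  induction fuel generalizing x with
  | zero => simp [pvStrip, pvStripN]
  | succ fuel ih =>
      show (if PySem.Int.mod (x : Int) (p : Int) = 0
            then pvStrip (p : Int) (PySem.Int.floordiv (x : Int) (p : Int)) fuel
            else (x : Int)) = _
      rw [PySem.Int.mod_natCast, PySem.Int.floordiv_natCast]
      by_cases h : x % p = 0
      · rw [if_pos (show ((x % p : Nat) : Int) = 0 by exact_mod_cast h), ih (x / p)]
        simp [pvStripN, h]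
      · rw [if_neg (show ((x % p : Nat) : Int) ≠ 0 by exact_mod_cast h)]
        simp [pvStripN, h]

lemma pvStripN_spec (p : Nat) (hp : 2 ≤ p) :
    ∀ fuel x, 0 < x → x ≤ fuel →
      ¬ p ∣ pvStripN p x fuel ∧ ∃ k, x = p ^ k * pvStripN p x fuel := by
  intro fuel
  induction fuel with
  | zero => intro x hx hle; omega
  | succ fuel ih =>
      intro x hx hle
      by_cases h : x % p = 0
      · have hdvd : p ∣ x := Nat.dvd_of_mod_eq_zero h
        have hq : 0 < x / p := Nat.div_pos (Nat.le_of_dvd hx hdvd) (by omega)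
        have hlt : x / p < x := Nat.div_lt_self hx (by omega)
        obtain ⟨h1, k, h2⟩ := ih (x / p) hq (by omega)
        refine ⟨by simpa [pvStripN, h] using h1, k + 1, ?_⟩
        rw [pvStripN, if_pos h]
        calc x = p * (x / p) := (Nat.mul_div_cancel' hdvd).symm
        _ = p * (p ^ k * pvStripN p (x / p) fuel) := by rw [← h2]
        _ = p ^ (k + 1) * pvStripN p (x / p) fuel := by ring
      · refine ⟨?_, 0, by simp [pvStripN, h]⟩
        rw [pvStripN, if_neg h]
        intro hdvd
        exact h (Nat.mod_eq_zero_of_dvd hdvd)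

-- order-divides characterization
lemma pvOrd_dvd (m t : Nat) (hm : 2 ≤ m) (ht1 : 0 < t)
    (ht2 : 10 ^ t % m = 1)
    (htmin : ∀ l, 0 < l → l < t → 10 ^ l % m ≠ 1) :
    ∀ e, 10 ^ e % m = 1 ↔ t ∣ e := by
  have key : ∀ q, 10 ^ (t * q) % m = 1 := by
    intro q
    rw [pow_mul, Nat.pow_mod, ht2, one_pow, Nat.one_mod_eq_one.mpr (by omega)]
  intro e
  constructor
  · intro he
    have hsplit : 10 ^ e % m = 10 ^ (e % t) % m := by
      conv_lhs => rw [← Nat.div_add_mod e t]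
      rw [pow_add, Nat.mul_mod, key, one_mul, Nat.mod_mod_of_dvd _ dvd_rfl]
    have h2 : 10 ^ (e % t) % m = 1 := by rw [← hsplit, he]
    rcases Nat.eq_zero_or_pos (e % t) with h0 | hpos
    · exact Nat.dvd_of_mod_eq_zero h0
    · exact absurd h2 (htmin _ hpos (Nat.mod_lt _ ht1))
  · rintro ⟨q, rfl⟩
    exact key q

-- a remainder repeats exactly when the index has passed the 2- and 5-part of n
-- and the gap is a multiple of the order of 10 modulo the reduced part m
lemma pvRepeat_iff (n a b m : Nat) (hm : 0 < m) (hN : n = 2 ^ a * (5 ^ b * m))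
    (cop : Nat.Coprime 10 m) (i j : Nat) (hij : i < j) :
    (pvR n i = pvR n j) ↔ (a ≤ i ∧ b ≤ i ∧ m ∣ 10 ^ (j - i) - 1) := by
  have hn0 : 0 < n := by
    rw [hN]; positivity
  have hle : (10:Nat) ^ i ≤ 10 ^ j := Nat.pow_le_pow_right (by norm_num) (le_of_lt hij)
  have hstep1 : (pvR n i = pvR n j) ↔ n ∣ 10 ^ j - 10 ^ i := Nat.modEq_iff_dvd' hle
  have hsub : (10:Nat) ^ j - 10 ^ i = 10 ^ i * (10 ^ (j - i) - 1) := by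
    rw [Nat.mul_sub, mul_one, ← pow_add, Nat.add_sub_cancel' (le_of_lt hij)]
  have h10X : (10:Nat) ∣ 10 ^ (j - i) := dvd_pow_self 10 (by omega)
  have hX1 : (1:Nat) ≤ 10 ^ (j - i) := Nat.one_le_pow _ _ (by norm_num)
  have h2X : ¬ (2:Nat) ∣ (10 ^ (j - i) - 1) := by
    obtain ⟨c, hc⟩ := h10X; omega
  have h5X : ¬ (5:Nat) ∣ (10 ^ (j - i) - 1) := by
    obtain ⟨c, hc⟩ := h10X; omega
  have cop2X : Nat.Coprime (2 ^ a) (10 ^ (j - i) - 1) :=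
    Nat.Coprime.pow_left a ((Nat.Prime.coprime_iff_not_dvd Nat.prime_two).mpr h2X)
  have cop5X : Nat.Coprime (5 ^ b) (10 ^ (j - i) - 1) :=
    Nat.Coprime.pow_left b ((Nat.Prime.coprime_iff_not_dvd (by norm_num)).mpr h5X)
  have copm10i : Nat.Coprime m (10 ^ i) := Nat.Coprime.pow_right i cop.symm
  have hpow10 : (10:Nat) ^ i = 2 ^ i * 5 ^ i := by
    rw [show (10:Nat) = 2 * 5 from rfl, mul_pow]
  rw [hstep1, hsub]
  constructor
  · intro hdvd
    have h2a : (2:Nat) ^ a ∣ 10 ^ i := by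
      refine Nat.Coprime.dvd_of_dvd_mul_right cop2X ?_
      exact dvd_trans ⟨5 ^ b * m, hN⟩ hdvd
    have h5b : (5:Nat) ^ b ∣ 10 ^ i := by
      refine Nat.Coprime.dvd_of_dvd_mul_right cop5X ?_
      refine dvd_trans ?_ hdvd
      exact ⟨2 ^ a * m, by rw [hN]; ring⟩
    have hmX : m ∣ 10 ^ (j - i) - 1 := by
      refine Nat.Coprime.dvd_of_dvd_mul_left copm10i ?_
      refine dvd_trans ?_ hdvd
      exact ⟨2 ^ a * 5 ^ b, by rw [hN]; ring⟩
    have hai : a ≤ i := by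
      have h2i : (2:Nat) ^ a ∣ 2 ^ i := by
        rw [hpow10] at h2a
        exact Nat.Coprime.dvd_of_dvd_mul_right
          (Nat.Coprime.pow_left a (Nat.Coprime.pow_right i (by norm_num))) h2a
      exact (Nat.pow_dvd_pow_iff_le_right (by norm_num)).mp h2i
    have hbi : b ≤ i := by
      have h5i : (5:Nat) ^ b ∣ 5 ^ i := by
        rw [hpow10, mul_comm] at h5b
        exact Nat.Coprime.dvd_of_dvd_mul_right
          (Nat.Coprime.pow_left b (Nat.Coprime.pow_right i (by norm_num))) h5b
      exact (Nat.pow_dvd_pow_iff_le_right (by norm_num)).mp h5i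
    exact ⟨hai, hbi, hmX⟩
  · rintro ⟨hai, hbi, hmX⟩
    rw [hN, hpow10]
    have h1 : (2:Nat) ^ a ∣ 2 ^ i := pow_dvd_pow 2 hai
    have h2 : (5:Nat) ^ b * m ∣ 5 ^ i * (10 ^ (j - i) - 1) :=
      mul_dvd_mul (pow_dvd_pow 5 hbi) hmX
    calc (2:Nat) ^ a * (5 ^ b * m) ∣ 2 ^ i * (5 ^ i * (10 ^ (j - i) - 1)) :=
          mul_dvd_mul h1 h2
    _ = 2 ^ i * 5 ^ i * (10 ^ (j - i) - 1) := by ring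

-- a remainder is 0 exactly when n has no reduced part and the index passed the 2- and 5-part
lemma pvZero_iff (n a b m : Nat) (hm : 0 < m) (hN : n = 2 ^ a * (5 ^ b * m))
    (cop : Nat.Coprime 10 m) (k : Nat) :
    (pvR n k = 0) ↔ (a ≤ k ∧ b ≤ k ∧ m = 1) := by
  have hn0 : 0 < n := by rw [hN]; positivity
  have hpow10 : ∀ i : Nat, (10:Nat) ^ i = 2 ^ i * 5 ^ i := by
    intro i; rw [show (10:Nat) = 2 * 5 from rfl, mul_pow]
  have hstep : (pvR n k = 0) ↔ n ∣ 10 ^ k :=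
    ⟨Nat.dvd_of_mod_eq_zero, Nat.mod_eq_zero_of_dvd⟩
  rw [hstep]
  constructor
  · intro hdvd
    have hmk : m ∣ 10 ^ k := dvd_trans ⟨2 ^ a * 5 ^ b, by rw [hN]; ring⟩ hdvd
    have hm1 : m = 1 :=
      Nat.Coprime.eq_one_of_dvd (Nat.Coprime.pow_right k cop.symm) hmk
    have h2a : (2:Nat) ^ a ∣ 10 ^ k := dvd_trans ⟨5 ^ b * m, hN⟩ hdvd
    have h5b : (5:Nat) ^ b ∣ 10 ^ k := dvd_trans ⟨2 ^ a * m, by rw [hN]; ring⟩ hdvd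
    have hak : a ≤ k := by
      have h2i : (2:Nat) ^ a ∣ 2 ^ k := by
        rw [hpow10 k] at h2a
        exact Nat.Coprime.dvd_of_dvd_mul_right
          (Nat.Coprime.pow_left a (Nat.Coprime.pow_right k (by norm_num))) h2a
      exact (Nat.pow_dvd_pow_iff_le_right (by norm_num)).mp h2i
    have hbk : b ≤ k := by
      have h5i : (5:Nat) ^ b ∣ 5 ^ k := by
        rw [hpow10 k, mul_comm] at h5b
        exact Nat.Coprime.dvd_of_dvd_mul_right
          (Nat.Coprime.pow_left b (Nat.Coprime.pow_right k (by norm_num))) h5b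
      exact (Nat.pow_dvd_pow_iff_le_right (by norm_num)).mp h5i
    exact ⟨hak, hbk, hm1⟩
  · rintro ⟨hak, hbk, hm1⟩
    rw [hN, hm1, hpow10 k, mul_one]
    exact mul_dvd_mul (pow_dvd_pow 2 hak) (pow_dvd_pow 5 hbk)

-- main helper equality
lemma pvHelper_eq (d : Int) (hd : 2 ≤ d) :
    find_recurring_cycle_length d = pvCycleLengthAlt d := by
  set n := d.toNat with hndef
  have hdn : d = (n : Int) := by omega
  have hn : 2 ≤ n := by omega
  have hnpos : 0 < n := by omega
  -- analyse B's stripping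
  obtain ⟨h2m1, a, hA⟩ := pvStripN_spec 2 (by norm_num) n n hnpos le_rfl
  set m1 := pvStripN 2 n n with hm1def
  have hm1pos : 0 < m1 := by
    rcases Nat.eq_zero_or_pos m1 with h0 | h; · rw [h0, mul_zero] at hA; omega
    exact h
  have hm1le : m1 ≤ n := Nat.le_of_dvd hnpos ⟨2 ^ a, by rw [hA]; ring⟩
  obtain ⟨h5m, b, hB⟩ := pvStripN_spec 5 (by norm_num) n m1 hm1pos hm1le
  set m := pvStripN 5 m1 n with hmdef
  have hmpos : 0 < m := by
    rcases Nat.eq_zero_or_pos m with h0 | h; · rw [h0, mul_zero] at hB; omega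
    exact h
  have hmdvd1 : m ∣ m1 := ⟨5 ^ b, by rw [hB]; ring⟩
  have h2m : ¬ 2 ∣ m := fun h => h2m1 (h.trans hmdvd1)
  have hN : n = 2 ^ a * (5 ^ b * m) := by rw [hA, hB]
  have hmlen : m ≤ n := le_trans (Nat.le_of_dvd hm1pos hmdvd1) hm1le
  have cop : Nat.Coprime 10 m := by
    have c2 : Nat.Coprime 2 m := (Nat.Prime.coprime_iff_not_dvd Nat.prime_two).mpr h2m
    have c5 : Nat.Coprime 5 m := (Nat.Prime.coprime_iff_not_dvd (by norm_num)).mpr h5m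
    have h25 : Nat.Coprime (2 * 5) m := Nat.Coprime.mul c2 c5
    simpa using h25
  have han : a < n := by
    have h2a : (2:Nat) ^ a ∣ n := ⟨5 ^ b * m, hN⟩
    have := Nat.le_of_dvd hnpos h2a
    have := @Nat.lt_two_pow_self a
    omega
  have hbn : b < n := by
    have h5b : (5:Nat) ^ b ∣ n := ⟨2 ^ a * m, by rw [hN]; ring⟩
    have h1 := Nat.le_of_dvd hnpos h5b
    have h2 : b < 5 ^ b := Nat.lt_pow_self (by norm_num)
    omega
  -- B's value
  have hd1 : pvStrip 2 d d.toNat = ((m1 : Nat) : Int) := by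
    rw [hdn, Int.toNat_natCast, show (2:Int) = ((2:Nat):Int) by norm_num,
      pvStrip_natCast, hm1def]
  have hd2 : pvStrip 5 ((m1 : Nat) : Int) d.toNat = ((m : Nat) : Int) := by
    rw [hdn, Int.toNat_natCast, show (5:Int) = ((5:Nat):Int) by norm_num,
      pvStrip_natCast, hmdef]
  have halt : pvCycleLengthAlt d = (if pvStrip 5 (pvStrip 2 d d.toNat) d.toNat = 1 then (0:Int)
      else pvOrderLoop (pvStrip 5 (pvStrip 2 d d.toNat) d.toNat)
        (PySem.Int.mod 10 (pvStrip 5 (pvStrip 2 d d.toNat) d.toNat)) 1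
        (pvStrip 5 (pvStrip 2 d d.toNat) d.toNat).toNat) := rfl
  by_cases hm1case : m = 1
  · -- terminating decimal: A's remainder hits 0, B returns 0
    have hBval : pvCycleLengthAlt d = 0 := by
      rw [halt, hd1, hd2, hm1case]
      norm_num
    have hr0 : ((1 : Nat) : Int) = (1 : Int) := by norm_num
    have hstart : (pvR n 0 : Int) = 1 := by
      have : pvR n 0 = 1 := by simp [pvR, Nat.mod_eq_of_lt (by omega : 1 < n)]
      rw [this]; norm_num
    have hz := pvZero_iff n a b m hmpos hN cop
    have hrep := pvRepeat_iff n a b m hmpos hN cop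
    have hA0 : find_recurring_cycle_length d = 0 := by
      unfold find_recurring_cycle_length
      rw [hdn]
      have hempty : (∅ : Std.HashMap Int Int) = pvDictK n 0 := by
        simp [pvDictK]
      rw [hempty, ← hstart, show (0:Int) = ((0:Nat):Int) by norm_num]
      apply pvLoopA_zero n (max a b)
      · exact (hz (max a b)).mpr ⟨le_max_left _ _, le_max_right _ _, hm1case⟩
      · intro k hk i hik hik2
        obtain ⟨hai, hbi, -⟩ := (hrep i k hik).mp hik2
        omega
      · intro k hk h0
        obtain ⟨hak, hbk, -⟩ := (hz k).mp h0
        omega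
      · omega
      · show max a b - 0 < 2 * (↑n : Int).toNat + 4
        simp only [Int.toNat_natCast]
        omega
    rw [hA0, hBval]
  · -- recurring decimal: both sides compute the order t of 10 mod m
    have hm2 : 2 ≤ m := by omega
    have hex : ∃ l, 0 < l ∧ 10 ^ l % m = 1 := by
      refine ⟨Nat.totient m, Nat.totient_pos.mpr hmpos, ?_⟩
      have h := Nat.ModEq.pow_totient cop
      have h2 : 10 ^ m.totient % m = 1 % m := h
      rwa [Nat.one_mod_eq_one.mpr (by omega)] at h2
    set t := Nat.find hex with htdef
    obtain ⟨ht1, ht2⟩ := Nat.find_spec hex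
    have htmin : ∀ l, 0 < l → l < t → 10 ^ l % m ≠ 1 := by
      intro l hl hlt hcon
      exact Nat.find_min hex hlt ⟨hl, hcon⟩
    have htphi : t ≤ Nat.totient m := by
      apply Nat.find_min'
      refine ⟨Nat.totient_pos.mpr hmpos, ?_⟩
      have h := Nat.ModEq.pow_totient cop
      have h2 : 10 ^ m.totient % m = 1 % m := h
      rwa [Nat.one_mod_eq_one.mpr (by omega)] at h2
    have htm : t < m := lt_of_le_of_lt htphi (Nat.totient_lt m hm2)
    have hz := pvZero_iff n a b m hmpos hN cop
    have hrep := pvRepeat_iff n a b m hmpos hN cop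
    have hord := pvOrd_dvd m t hm2 ht1 ht2 htmin
    have hdvd_iff : ∀ e : Nat, 0 < e → (m ∣ 10 ^ e - 1 ↔ 10 ^ e % m = 1) := by
      intro e he
      have h1 : (1:Nat) ≤ 10 ^ e := Nat.one_le_pow _ _ (by norm_num)
      rw [← Nat.modEq_iff_dvd' h1]
      unfold Nat.ModEq
      rw [Nat.one_mod_eq_one.mpr (by omega)]
      exact ⟨fun h => h.symm, fun h => h.symm⟩
    set s := max a b with hsdef
    -- A's value is t
    have hA0 : find_recurring_cycle_length d = (t : Int) := by
      have hstart : (pvR n 0 : Int) = 1 := by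
        have h : pvR n 0 = 1 := by simp [pvR, Nat.mod_eq_of_lt (by omega : 1 < n)]
        rw [h]; norm_num
      unfold find_recurring_cycle_length
      rw [hdn]
      have hempty : (∅ : Std.HashMap Int Int) = pvDictK n 0 := by
        simp [pvDictK]
      rw [hempty, ← hstart, show (0:Int) = ((0:Nat):Int) by norm_num]
      apply pvLoopA_hit n s t ht1
      · refine ((hrep s (s + t) (by omega)).mpr ?_).symm
        refine ⟨le_max_left _ _, le_max_right _ _, ?_⟩
        refine (hdvd_iff (s + t - s) (by omega)).mpr ?_
        rw [show s + t - s = t by omega]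
        exact ht2
      · intro k hk i hik heq
        obtain ⟨hai, hbi, hmX⟩ := (hrep i k hik).mp heq
        have h10 : 10 ^ (k - i) % m = 1 := (hdvd_iff (k - i) (by omega)).mp hmX
        have hdvd : t ∣ (k - i) := (hord (k - i)).mp h10
        have : t ≤ k - i := Nat.le_of_dvd (by omega) hdvd
        omega
      · intro k hk h0
        obtain ⟨-, -, hm1⟩ := (hz k).mp h0
        exact hm1case hm1
      · omega
      · show s + t - 0 < 2 * (↑n : Int).toNat + 4
        simp only [Int.toNat_natCast]
        omega
    -- B's value is t
    have hBval : pvCycleLengthAlt d = (t : Int) := by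
      rw [halt, hd1, hd2]
      have hne1 : ((m : Nat) : Int) ≠ 1 := by
        intro h; exact hm1case (by exact_mod_cast h)
      rw [if_neg hne1]
      have hmod10 : PySem.Int.mod 10 ((m : Nat) : Int) = ((10 ^ 1 % m : Nat) : Int) := by
        rw [show (10:Int) = ((10:Nat):Int) by norm_num, PySem.Int.mod_natCast]
        norm_num
      rw [hmod10, show (1:Int) = ((1:Nat):Int) by norm_num, Int.toNat_natCast]
      exact pvLoopB m t ht2 htmin m 1 le_rfl ht1 (by omega)
    rw [hA0, hBval]

-- the two outer folds agree, with swapped pair components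
lemma pvFold_eq (l : List Int) (hmem : ∀ x ∈ l, 2 ≤ x) : ∀ (ml md : Int),
    l.foldl (fun (st : Int × Int) d =>
        let cycle_length := find_recurring_cycle_length d
        if cycle_length > st.1 then (cycle_length, d) else st) (ml, md)
      = Prod.swap (l.foldl (fun (best : Int × Int) d =>
        let length := pvCycleLengthAlt d
        if length > best.2 then (d, length) else best) (md, ml)) := by
  induction l with
  | nil => intro ml md; rfl
  | cons x xs ih =>
      intro ml md
      have hx : 2 ≤ x := hmem x (by simp)
      have ihx := ih (fun y hy => hmem y (by simp [hy]))
      have e1 : (let cycle_length := find_recurring_cycle_length x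
            if cycle_length > (ml, md).1 then (cycle_length, x) else (ml, md))
          = (if pvCycleLengthAlt x > ml then (pvCycleLengthAlt x, x) else (ml, md)) := by
        show (if find_recurring_cycle_length x > ml
              then (find_recurring_cycle_length x, x) else (ml, md)) = _
        rw [pvHelper_eq x hx]
      have e2 : (let length := pvCycleLengthAlt x
            if length > (md, ml).2 then (x, length) else (md, ml))
          = (if pvCycleLengthAlt x > ml then (x, pvCycleLengthAlt x) else (md, ml)) := rfl
      rw [List.foldl_cons, List.foldl_cons, e1, e2]
      by_cases hc : pvCycleLengthAlt x > ml
      · rw [if_pos hc, if_pos hc]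
        exact ihx _ _
      · rw [if_neg hc, if_neg hc]
        exact ihx _ _

-- ===== VERDICT (by name: the statement is the Claim_ definition above) =====
theorem find_longest_recurring_cycle_spec : Claim_equal_find_longest_recurring_cycle := by
  intro limit _
  unfold Spec_find_longest_recurring_cycle
  have h := pvFold_eq (PySem.List.pyRange 2 limit 1)
    (fun x hx => (PySem.List.mem_pyRange_one.mp hx).1) 0 0
  have h2 : find_longest_recurring_cycle limit
      = Prod.swap ((PySem.List.pyRange 2 limit 1).foldl (fun (st : Int × Int) d =>
          let cycle_length := find_recurring_cycle_length d
          if cycle_length > st.1 then (cycle_length, d) else st) (0, 0)) := rfl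
  have h3 : find_longest_recurring_cycle_alt limit
      = (PySem.List.pyRange 2 limit 1).foldl (fun (best : Int × Int) d =>
          let length := pvCycleLengthAlt d
          if length > best.2 then (d, length) else best) (0, 0) := rfl
  rw [h2, h3, h]
  exact Prod.swap_swap _
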